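-- pv_equiv track=rewrite | github.com/marubadtz/p-tools | backend/module_db.py | __from_dict_to_records
-- ===== SOURCE A (Python) =====
-- def __from_dict_to_records(data_dict):
--     keys = data_dict.keys()
--     vals = list(zip(*data_dict.values()))
--     data_recs =[]
--     for v in vals:
--         dishDict=dict(zip(keys,v))
--         data_recs.append(dishDict)
--     return data_recs
-- ===== SOURCE B (Python) =====
-- def __from_dict_to_records(data_dict):
--     keys = list(data_dict.keys())
--     rows = min((len(col) for col in data_dict.values()), default=0)
--     return [{k: data_dict[k][i] for k in keys} for i in range(rows)]
-- ===== Notes on version B (the rewrite author's own statement) =====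
-- stated objective: alternative
-- what changed: B replaces the zip(*values) transpose plus per-row dict(zip(keys,v)) loop by computing the minimum column length once and building each record by direct per-column indexing data_dict[k][i] over a range of row indices.
import Mathlib
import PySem

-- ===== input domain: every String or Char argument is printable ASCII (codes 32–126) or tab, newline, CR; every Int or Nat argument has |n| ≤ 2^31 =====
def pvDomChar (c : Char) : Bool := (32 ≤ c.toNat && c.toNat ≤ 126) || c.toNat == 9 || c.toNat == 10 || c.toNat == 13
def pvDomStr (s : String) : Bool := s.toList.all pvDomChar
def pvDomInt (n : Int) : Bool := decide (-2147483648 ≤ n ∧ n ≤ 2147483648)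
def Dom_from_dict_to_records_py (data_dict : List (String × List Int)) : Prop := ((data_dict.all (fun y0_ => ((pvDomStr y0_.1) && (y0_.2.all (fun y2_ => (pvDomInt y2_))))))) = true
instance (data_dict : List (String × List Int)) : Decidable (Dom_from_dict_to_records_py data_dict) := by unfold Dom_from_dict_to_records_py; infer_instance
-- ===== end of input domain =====

-- B builds records by per-column indexing over row indices instead of transposing with zip(*values).

-- ===== PORT A =====
-- zip(*cols): rows up to the minimum column length; element i of each column (hand port, exact:
-- every index accessed is < each column's length, so getD never takes its default)
def pyZipStar (cols : List (List Int)) : List (List Int) :=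
  match cols with
  | [] => []
  | c :: cs =>
    let n := cs.foldl (fun m c' => min m c'.length) c.length
    (List.range n).map (fun i => (c :: cs).map (fun col => col.getD i 0))

def from_dict_to_records_py (data_dict : List (String × List Int)) : List (List (String × Int)) :=
  let keys := data_dict.map Prod.fst
  let vals := pyZipStar (data_dict.map Prod.snd)
  vals.foldl (fun recs v =>
    recs ++ [((keys.zip v).foldl (fun d kv => d.insert kv.1 kv.2) PySem.Dict.empty).items]) []

-- ===== PORT B =====
-- min((len(col) for col in vals), default=0)
def minColLen (cols : List (List Int)) : Nat :=
  match cols with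
  | [] => 0
  | c :: cs => cs.foldl (fun m c' => min m c'.length) c.length

def from_dict_to_records_py_alt (data_dict : List (String × List Int)) : List (List (String × Int)) :=
  let keys := data_dict.map Prod.fst
  let rows := minColLen (data_dict.map Prod.snd)
  (List.range rows).map (fun i =>
    (keys.foldl (fun d k =>
      d.insert k (((PySem.Dict.mk data_dict).getD k []).getD i 0)) PySem.Dict.empty).items)

-- ===== PRECONDITION & SPEC =====
-- Pre_ excludes association lists with duplicate keys: such lists do not represent any Python
-- dict (the actual Python argument), so no Python behaviour is excluded.
def Pre_from_dict_to_records_py (data_dict : List (String × List Int)) : Prop :=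
  (data_dict.map Prod.fst).Nodup

instance (data_dict : List (String × List Int)) : Decidable (Pre_from_dict_to_records_py data_dict) := by
  unfold Pre_from_dict_to_records_py; infer_instance

def pvWitness_from_dict_to_records_py : (List (String × List Int)) :=
  [("a", [1, 2]), ("b", [3, 4, 5])]

def Spec_from_dict_to_records_py (data_dict : List (String × List Int)) (out : List (List (String × Int))) : Prop := out = from_dict_to_records_py_alt data_dict
instance (data_dict : List (String × List Int)) (out : List (List (String × Int))) : Decidable (Spec_from_dict_to_records_py data_dict out) := by unfold Spec_from_dict_to_records_py; infer_instance

-- ===== CLAIM (what is proved, stated in full; the proofs are below) =====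
def Claim_equal_from_dict_to_records_py : Prop := ∀ (data_dict : List (String × List Int)), Dom_from_dict_to_records_py data_dict → Pre_from_dict_to_records_py data_dict → Spec_from_dict_to_records_py data_dict (from_dict_to_records_py data_dict)

-- ===== LEMMAS AND PROOFS =====

theorem foldl_append_singleton {α β : Type} (f : α → β) (l : List α) (acc : List β) :
    l.foldl (fun recs v => recs ++ [f v]) acc = acc ++ l.map f := by
  induction l generalizing acc with
  | nil => simp
  | cons x xs ih => simp [List.foldl, ih, List.append_assoc]

theorem zip_map_same {α β γ : Type} (f : α → β) (g : α → γ) (l : List α) :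
    (l.map f).zip (l.map g) = l.map (fun x => (f x, g x)) := by
  induction l with
  | nil => rfl
  | cons x xs ih => simp [ih]

theorem record_eq (data_dict : List (String × List Int))
    (h : (data_dict.map Prod.fst).Nodup) (i : Nat) :
    (((data_dict.map Prod.fst).zip ((data_dict.map Prod.snd).map (fun col => col.getD i 0))).foldl
        (fun d kv => d.insert kv.1 kv.2) PySem.Dict.empty).items =
    ((data_dict.map Prod.fst).foldl
        (fun d k => d.insert k (((PySem.Dict.mk data_dict).getD k []).getD i 0))
        PySem.Dict.empty).items := by
  rw [List.map_map, zip_map_same]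
  simp only [Function.comp_apply]
  have hA := PySem.Dict.items_foldl_insert_fresh
      (l := data_dict) (k := fun p => p.1)
      (v := fun p => (p.2.getD i 0 : Int)) (d := PySem.Dict.empty)
      (by intro a _; simp [PySem.Dict.contains_empty]) (by simpa using h)
  have hB := PySem.Dict.items_foldl_insert_fresh
      (l := data_dict.map Prod.fst) (k := fun k => k)
      (v := fun k => (((PySem.Dict.mk data_dict).getD k []).getD i 0 : Int))
      (d := PySem.Dict.empty)
      (by intro a _; simp [PySem.Dict.contains_empty]) (by simpa using h)
  simp only at hA hB
  have hfoldA :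
      (data_dict.map (fun x => (x.1, (x.2.getD i 0 : Int)))).foldl
          (fun d kv => d.insert kv.1 kv.2) PySem.Dict.empty
        = data_dict.foldl
          (fun d p => d.insert p.1 (p.2.getD i 0 : Int)) PySem.Dict.empty := by
    rw [List.foldl_map]
  rw [hfoldA, hA, hB]
  rw [List.map_map]
  apply List.map_congr_left
  intro p hp
  have hlook : (PySem.Dict.mk data_dict).getD p.1 ([] : List Int) = p.2 := by
    apply PySem.Dict.getD_of_mem_items
    · simpa [PySem.Dict.items] using hp
    · simpa [PySem.Dict.keys] using h
  simp [hlook]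

-- ===== VERDICT (by name: the statement is the Claim_ definition above) =====
theorem from_dict_to_records_py_spec : Claim_equal_from_dict_to_records_py := by
  intro data_dict _ hpre
  unfold Spec_from_dict_to_records_py from_dict_to_records_py from_dict_to_records_py_alt
  cases data_dict with
  | nil => simp [pyZipStar, minColLen]
  | cons p ps =>
    simp only [List.map_cons, pyZipStar, minColLen]
    rw [foldl_append_singleton, List.nil_append, List.map_map]
    apply List.map_congr_left
    intro i _
    have h2 := record_eq (p :: ps) hpre i
    simpa using h2
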